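-- pv_equiv track=rewrite | github.com/askhkhas995-debug/exam | piscine_forge/generators/handwritten.py | _nth_reverse
-- ===== SOURCE A (Python) =====
-- def _nth_reverse(s: str, n: int) -> str:
--     if n <= 0:
--         return s
--     result: list[str] = []
--     for i in range(0, len(s), n):
--         chunk = s[i:i + n]
--         result.append(chunk[::-1])
--     return "".join(result)
-- ===== SOURCE B (Python) =====
-- def _nth_reverse(s: str, n: int) -> str:
--     if n <= 0:
--         return s
--     pieces: list[str] = []
--     buf: list[str] = []
--     for ch in s:
--         buf.append(ch)
--         if len(buf) == n:
--             pieces.append("".join(reversed(buf)))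
--             buf = []
--     if buf:
--         pieces.append("".join(reversed(buf)))
--     return "".join(pieces)
-- ===== Notes on version B (the rewrite author's own statement) =====
-- stated objective: alternative
-- what changed: Replaced stride-n index slicing (range(0,len,n) + s[i:i+n][::-1]) with a single streaming pass over the characters that accumulates a buffer and flushes its reversal whenever it reaches n, with a final flush of the partial buffer.
import Mathlib
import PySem

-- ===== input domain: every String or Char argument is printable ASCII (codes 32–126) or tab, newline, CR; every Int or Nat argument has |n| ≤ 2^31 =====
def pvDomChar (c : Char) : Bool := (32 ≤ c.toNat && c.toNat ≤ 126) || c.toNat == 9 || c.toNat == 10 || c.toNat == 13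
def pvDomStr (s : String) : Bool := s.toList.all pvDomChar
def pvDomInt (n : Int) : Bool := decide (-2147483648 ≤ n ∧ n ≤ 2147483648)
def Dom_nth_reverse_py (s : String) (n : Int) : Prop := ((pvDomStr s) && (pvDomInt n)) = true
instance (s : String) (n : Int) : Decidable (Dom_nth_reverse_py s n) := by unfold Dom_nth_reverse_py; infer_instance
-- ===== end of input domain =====

-- B replaces stride-n slicing with a streaming buffer-and-flush pass (alternative decomposition, same cost).

-- ===== PORT A =====
-- chunk strings are carried as char lists; "".join(result) = Chars.join [] (flatten);
-- chunk[::-1] is PySem.List.slice? with step -1 (never none for step ≠ 0, so .getD []).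
def nth_reverse_py (s : String) (n : Int) : String :=
  if n ≤ 0 then s
  else
    let result : List (List Char) :=
      (PySem.List.pyRange 0 (PySem.Str.len s) n).foldl
        (fun res i =>
          res ++ [(PySem.List.slice? (PySem.List.slice s.toList (some i) (some (i + n))) none none (-1)).getD []])
        []
    String.ofList (PySem.Chars.join [] result)

-- ===== PORT B =====
-- streaming pass: grow buf; when its length hits n, flush buf reversed; final partial flush.
def nth_reverse_py_alt (s : String) (n : Int) : String :=
  if n ≤ 0 then s
  else
    let st := s.toList.foldl
      (fun (st : List (List Char) × List Char) c =>
        let buf := st.2 ++ [c]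
        if (buf.length : Int) = n then (st.1 ++ [buf.reverse], ([] : List Char)) else (st.1, buf))
      ([], [])
    let pieces := if st.2 = [] then st.1 else st.1 ++ [st.2.reverse]
    String.ofList (PySem.Chars.join [] pieces)

-- ===== PRECONDITION & SPEC =====
def Spec_nth_reverse_py (s : String) (n : Int) (out : String) : Prop := out = nth_reverse_py_alt s n
instance (s : String) (n : Int) (out : String) : Decidable (Spec_nth_reverse_py s n out) := by unfold Spec_nth_reverse_py; infer_instance

-- ===== CLAIM (what is proved, stated in full; the proofs are below) =====
def Claim_equal_nth_reverse_py : Prop := ∀ (s : String) (n : Int), Dom_nth_reverse_py s n → Spec_nth_reverse_py s n (nth_reverse_py s n)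

-- ===== LEMMAS AND PROOFS =====

-- reference chunking: reverse each (m+1)-sized chunk
def chunkRev (m : Nat) : List Char → List (List Char)
  | [] => []
  | c :: t => (((c :: t).take (m+1)).reverse) :: chunkRev m (t.drop m)
termination_by l => l.length
decreasing_by simp

theorem chunkRev_cons' (m : Nat) (l : List Char) (h : l ≠ []) :
    chunkRev m l = ((l.take (m+1)).reverse) :: chunkRev m (l.drop (m+1)) := by
  cases l with
  | nil => exact absurd rfl h
  | cons c t =>
    conv_lhs => rw [chunkRev]
    simp

theorem foldl_app {α β : Type} (xs : List α) (f : α → β) (init : List β) :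
    xs.foldl (fun acc x => acc ++ [f x]) init = init ++ xs.map f := by
  induction xs generalizing init with
  | nil => simp
  | cons x xs ih => simp [List.foldl_cons, ih]

theorem join_nil_flatten (ps : List (List Char)) :
    PySem.Chars.join [] ps = ps.flatten := by
  unfold PySem.Chars.join
  induction ps with
  | nil => simp [List.intercalate]
  | cons p ps ih =>
    cases ps with
    | nil => simp [List.intercalate]
    | cons q qs =>
      simp only [List.intercalate, List.intersperse] at ih ⊢
      simp_all

theorem pyRange_chunks (m len : Nat) :
    PySem.List.pyRange 0 (len : Int) ((m+1 : Nat) : Int)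
      = (List.range ((len + m)/(m+1))).map (fun k => (((m+1)*k : Nat) : Int)) := by
  rw [PySem.List.pyRange_of_pos 0 (len : Int) (by positivity)]
  by_cases h : 0 < len
  · have h1 : (0 : Int) < (len : Int) := by exact_mod_cast h
    simp only [if_pos h1]
    have h2 : ((len : Int) - 0 + ((m+1 : Nat) : Int) - 1) = ((len + m : Nat) : Int) := by
      push_cast; ring
    rw [h2, ← Int.natCast_div]
    simp only [Int.toNat_natCast]
    apply List.map_congr_left
    intro k _
    push_cast; ring
  · have h0 : len = 0 := by omega
    subst h0
    have h0 : m/(m+1) = 0 := Nat.div_eq_of_lt (by omega)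
    simp [h0]

theorem chunkA (m : Nat) (l : List Char) :
    (List.range ((l.length + m)/(m+1))).map
      (fun k => ((l.drop ((m+1)*k)).take (m+1)).reverse) = chunkRev m l := by
  cases l with
  | nil =>
    have h0 : m/(m+1) = 0 := Nat.div_eq_of_lt (by omega)
    simp [h0]
    rw [chunkRev]
  | cons c t =>
    have hc : ((c :: t).length + m)/(m+1) = t.length/(m+1) + 1 := by
      have : (c :: t).length + m = t.length + (m+1) := by simp; omega
      rw [this, Nat.add_div_right _ (Nat.succ_pos m)]
    have hd : ((t.drop m).length + m)/(m+1) = t.length/(m+1) := by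
      by_cases h : m ≤ t.length
      · rw [List.length_drop]; congr 1; omega
      · rw [List.length_drop]
        have h1 : t.length - m = 0 := by omega
        rw [h1, Nat.zero_add, Nat.div_eq_of_lt (by omega), Nat.div_eq_of_lt (by omega)]
    rw [hc, List.range_succ_eq_map, List.map_cons, List.map_map]
    have hf : ((fun k => (((c :: t).drop ((m+1)*k)).take (m+1)).reverse) ∘ Nat.succ)
        = fun k => (((t.drop m).drop ((m+1)*k)).take (m+1)).reverse := by
      funext k
      simp only [Function.comp]
      congr 1
      have : (m+1) * (k+1) = (m+1)*k + (m+1) := by ring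
      rw [Nat.succ_eq_add_one, this, Nat.add_comm ((m+1)*k) (m+1), ← List.drop_drop]
      simp
    rw [hf, ← hd, chunkA m (t.drop m)]
    conv_rhs => rw [chunkRev]
    simp
termination_by l.length
decreasing_by simp

theorem chunkB (m : Nat) (l : List Char) : ∀ (buf : List Char) (pieces : List (List Char)),
    buf.length ≤ m →
    (let st := l.foldl
        (fun (st : List (List Char) × List Char) c =>
          let buf := st.2 ++ [c]
          if (buf.length : Int) = ((m+1 : Nat) : Int) then (st.1 ++ [buf.reverse], ([] : List Char)) else (st.1, buf))
        (pieces, buf)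
     (if st.2 = [] then st.1 else st.1 ++ [st.2.reverse]))
    = pieces ++ chunkRev m (buf ++ l) := by
  induction l with
  | nil =>
    intro buf pieces hbuf
    simp only [List.foldl_nil, List.append_nil]
    cases buf with
    | nil => rw [chunkRev]; simp
    | cons c t =>
      rw [chunkRev]
      have h1 : (c :: t).take (m+1) = c :: t :=
        List.take_of_length_le (by simp at hbuf ⊢; omega)
      have h2 : t.drop m = [] := List.drop_eq_nil_of_le (by simp at hbuf; omega)
      rw [h1, h2, chunkRev]
      simp
  | cons c l' ih =>
    intro buf pieces hbuf
    simp only [List.foldl_cons]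
    by_cases h : ((buf ++ [c]).length : Int) = ((m+1 : Nat) : Int)
    · have hb : (buf ++ [c]).length = m+1 := by exact_mod_cast h
      simp only [if_pos h]
      rw [ih [] (pieces ++ [(buf ++ [c]).reverse]) (by simp)]
      have hne : (buf ++ [c]) ++ l' ≠ [] := by simp
      have hsplit : buf ++ c :: l' = (buf ++ [c]) ++ l' := by simp
      rw [hsplit, chunkRev_cons' m _ hne,
          List.take_append_of_le_length (by omega), List.drop_append_of_le_length (by omega)]
      have ht : (buf ++ [c]).take (m+1) = buf ++ [c] := List.take_of_length_le (by omega)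
      have hdr : (buf ++ [c]).drop (m+1) = [] := List.drop_eq_nil_of_le (by omega)
      simp [ht, hdr]
    · have hb : (buf ++ [c]).length ≠ m+1 := by
        intro hh; exact h (by exact_mod_cast hh)
      have hlen : (buf ++ [c]).length ≤ m := by simp at hb ⊢; omega
      simp only [if_neg h]
      rw [ih (buf ++ [c]) pieces hlen]
      simp

-- ===== VERDICT (by name: the statement is the Claim_ definition above) =====
theorem nth_reverse_py_spec : Claim_equal_nth_reverse_py := by
  intro s n _
  unfold Spec_nth_reverse_py nth_reverse_py nth_reverse_py_alt
  by_cases hn : n ≤ 0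
  · simp [hn]
  · simp only [if_neg hn]
    set m : Nat := (n - 1).toNat with hm
    have hnm : n = ((m+1 : Nat) : Int) := by simp [hm]; omega
    congr 1
    rw [join_nil_flatten, join_nil_flatten]
    congr 1
    rw [hnm]
    rw [chunkB m s.toList [] [] (Nat.zero_le m)]
    simp only [List.nil_append]
    rw [foldl_app _ (fun i => (PySem.List.slice? (PySem.List.slice s.toList (some i) (some (i + ((m+1:Nat):Int)))) none none (-1)).getD [])]
    simp only [List.nil_append]
    unfold PySem.Str.len
    rw [pyRange_chunks m s.toList.length, List.map_map]
    rw [← chunkA m s.toList]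
    apply List.map_congr_left
    intro k _
    simp only [Function.comp]
    have : (((m+1)*k : Nat) : Int) + ((m+1 : Nat) : Int) = (((m+1)*k + (m+1) : Nat) : Int) := by push_cast; ring
    rw [this]
    rw [PySem.List.slice_natCast, PySem.List.slice?_none_none_neg_one]
    simp
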